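-- pv_equiv track=rewrite | github.com/pm3512/WeatherMonitor | CSVMaker.py | get_best_available_stations
-- ===== SOURCE A (Python) =====
-- day_span = 2
--
-- num_stations = 5
--
-- def get_best_available_stations(sorted_row, all_available_stations):
--     best_available_stations = [[] for i in range(2 * day_span + 1)]
--     i = 1
--     while i < len(sorted_row) and len(best_available_stations[0]) < num_stations:
--         if all([sorted_row[i] in day and 'PRCP' in day[sorted_row[i]] for day in all_available_stations]):
--             for day_number in range(2 * day_span + 1):
--                 best_available_stations[day_number].append(all_available_stations[day_number][sorted_row[i]])
--         i += 1
--     return best_available_stations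
-- ===== SOURCE B (Python) =====
-- day_span = 2
--
-- num_stations = 5
--
-- def get_best_available_stations(sorted_row, all_available_stations):
--     # one pass over all observations builds a counter; a station is available on
--     # every day iff its count equals the number of days (each dict contributes
--     # at most once per key), so the per-station scan over days disappears
--     counts = {}
--     for day in all_available_stations:
--         for name, obs in day.items():
--             if 'PRCP' in obs:
--                 counts[name] = counts.get(name, 0) + 1
--     n_days = len(all_available_stations)
--     valid = []
--     for s in sorted_row[1:]:
--         if counts.get(s, 0) == n_days:
--             valid.append(s)
--             if len(valid) == num_stations:
--                 break
--     return [[all_available_stations[d][s] for s in valid]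
--             for d in range(2 * day_span + 1)]
-- ===== Notes on version B (the rewrite author's own statement) =====
-- stated objective: faster
-- what changed: B replaces A's per-station scan over all days (the all(... for day in all_available_stations) inner loop inside the while) with a counter dict built in one pass over every day's items: a station is available everywhere iff its count equals the number of days, so selection becomes an O(1) lookup per candidate; the per-day output is then built in one nested comprehension instead of A's lockstep append into mutated accumulator lists.
import Mathlib
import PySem

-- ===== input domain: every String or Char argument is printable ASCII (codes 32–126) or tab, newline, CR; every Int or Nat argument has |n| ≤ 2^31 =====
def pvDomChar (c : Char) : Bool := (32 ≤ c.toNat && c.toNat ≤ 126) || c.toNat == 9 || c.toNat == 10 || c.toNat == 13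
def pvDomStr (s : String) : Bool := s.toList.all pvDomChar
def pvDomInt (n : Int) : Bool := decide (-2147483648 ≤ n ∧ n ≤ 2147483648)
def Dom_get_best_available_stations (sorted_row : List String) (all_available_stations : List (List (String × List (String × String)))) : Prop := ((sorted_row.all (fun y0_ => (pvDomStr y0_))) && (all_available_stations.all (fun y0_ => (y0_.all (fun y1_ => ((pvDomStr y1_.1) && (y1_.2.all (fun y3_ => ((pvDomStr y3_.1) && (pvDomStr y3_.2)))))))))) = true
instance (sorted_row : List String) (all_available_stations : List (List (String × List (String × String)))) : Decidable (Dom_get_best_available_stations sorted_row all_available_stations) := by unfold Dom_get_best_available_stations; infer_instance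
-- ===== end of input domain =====

-- B replaces A's per-station scan over all days with a counter dict built in one pass over all
-- observations (station available everywhere ↔ count = number of days), then builds the per-day
-- output in one nested comprehension; equivalence of the return values is proved on Pre_.

-- ===== PORT A =====
-- module constants
def pv_day_span : Nat := 2
def pv_num_stations : Nat := 5

-- 'sorted_row[i] in day and "PRCP" in day[sorted_row[i]]' for one day (dict = assoc list, first match)
def pvOkA (all_available_stations : List (List (String × List (String × String)))) (s : String) : Bool :=
  all_available_stations.all (fun day =>
    match (PySem.Dict.mk day).get? s with
    | some v => (PySem.Dict.mk v).contains "PRCP"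
    | none => false)

-- 'for day_number in range(2*day_span+1): best[day_number].append(all_available_stations[day_number][s])'
-- getD defaults stand for Python's IndexError/KeyError, excluded by Pre_ / guaranteed by the ok-check
def pvPushA (all_available_stations : List (List (String × List (String × String)))) (s : String)
    (best : List (List (List (String × String)))) : List (List (List (String × String))) :=
  (List.range (2 * pv_day_span + 1)).foldl
    (fun b d => b.set d ((b.getD d []) ++ [(PySem.Dict.mk (all_available_stations.getD d [])).getD s []])) best

-- the while loop: state i and the five accumulator lists
def pvLoopA (sorted_row : List String) (all_available_stations : List (List (String × List (String × String))))
    (i : Nat) (best : List (List (List (String × String)))) : List (List (List (String × String))) :=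
  if h : i < sorted_row.length ∧ (best.getD 0 []).length < pv_num_stations then
    pvLoopA sorted_row all_available_stations (i + 1)
      (if pvOkA all_available_stations (sorted_row.getD i "") then
        pvPushA all_available_stations (sorted_row.getD i "") best
      else best)
  else best
termination_by sorted_row.length - i
decreasing_by omega

def get_best_available_stations (sorted_row : List String) (all_available_stations : List (List (String × List (String × String)))) : List (List (List (String × String))) :=
  pvLoopA sorted_row all_available_stations 1 (List.replicate (2 * pv_day_span + 1) [])

-- ===== PORT B =====
-- the body of the inner loop: 'if "PRCP" in obs: counts[name] = counts.get(name, 0) + 1'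
def pvStep (c : PySem.Dict String Int) (p : String × List (String × String)) : PySem.Dict String Int :=
  if (PySem.Dict.mk p.2).contains "PRCP" then c.modify p.1 0 (· + 1) else c

-- 'for day in aas: for name, obs in day.items(): <pvStep>'
def pvCountB (all_available_stations : List (List (String × List (String × String)))) : PySem.Dict String Int :=
  all_available_stations.foldl
    (fun counts day => (PySem.Dict.mk day).items.foldl pvStep counts)
    PySem.Dict.empty

-- 'for s in sorted_row[1:]: if counts.get(s,0) == n_days: valid.append(s); break at num_stations'
def pvSelectB (counts : PySem.Dict String Int) (n_days : Int) :
    List String → List String → List String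
  | [], acc => acc
  | s :: rest, acc =>
    if counts.getD s 0 == n_days then
      if (acc ++ [s]).length == pv_num_stations then acc ++ [s]
      else pvSelectB counts n_days rest (acc ++ [s])
    else pvSelectB counts n_days rest acc

def get_best_available_stations_alt (sorted_row : List String) (all_available_stations : List (List (String × List (String × String)))) : List (List (List (String × String))) :=
  let counts := pvCountB all_available_stations
  let n_days : Int := all_available_stations.length
  let valid := pvSelectB counts n_days (sorted_row.drop 1) []
  (List.range (2 * pv_day_span + 1)).map
    (fun d => valid.map (fun s => (PySem.Dict.mk (all_available_stations.getD d [])).getD s []))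

-- ===== PRECONDITION & SPEC =====
-- Pre_ is where Python A returns: A raises IndexError (at all_available_stations[day_number]) iff
-- fewer than 2*day_span+1 days are given yet some station of sorted_row[1:] passes the test.
-- The Nodup conjunct only excludes day assoc-lists with duplicate keys, which represent no Python
-- dict (Python dict keys are unique), so no actual Python input is excluded by it.
def Pre_get_best_available_stations (sorted_row : List String) (all_available_stations : List (List (String × List (String × String)))) : Prop :=
  (∀ day ∈ all_available_stations, (day.map Prod.fst).Nodup) ∧
  (2 * pv_day_span + 1 ≤ all_available_stations.length ∨
    ∀ s ∈ sorted_row.drop 1, pvOkA all_available_stations s = false)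

instance (sorted_row : List String) (all_available_stations : List (List (String × List (String × String)))) : Decidable (Pre_get_best_available_stations sorted_row all_available_stations) := by unfold Pre_get_best_available_stations; infer_instance

def pvWitness_get_best_available_stations : List String × (List (List (String × List (String × String)))) :=
  (["hdr", "s1"],
   [[("s1", [("PRCP", "1")])], [("s1", [("PRCP", "2")])], [("s1", [("PRCP", "3")])],
    [("s1", [("PRCP", "4")])], [("s1", [("PRCP", "5")])]])

def Spec_get_best_available_stations (sorted_row : List String) (all_available_stations : List (List (String × List (String × String)))) (out : List (List (List (String × String)))) : Prop := out = get_best_available_stations_alt sorted_row all_available_stations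
instance (sorted_row : List String) (all_available_stations : List (List (String × List (String × String)))) (out : List (List (List (String × String)))) : Decidable (Spec_get_best_available_stations sorted_row all_available_stations out) := by unfold Spec_get_best_available_stations; infer_instance

-- ===== CLAIM (what is proved, stated in full; the proofs are below) =====
def Claim_equal_get_best_available_stations : Prop := ∀ (sorted_row : List String) (all_available_stations : List (List (String × List (String × String)))), Dom_get_best_available_stations sorted_row all_available_stations → Pre_get_best_available_stations sorted_row all_available_stations → Spec_get_best_available_stations sorted_row all_available_stations (get_best_available_stations sorted_row all_available_stations)

-- ===== LEMMAS AND PROOFS =====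

-- one day's availability test (the body of pvOkA / pvAvail)
def pvOkDay (day : List (String × List (String × String))) (s : String) : Bool :=
  match (PySem.Dict.mk day).get? s with
  | some v => (PySem.Dict.mk v).contains "PRCP"
  | none => false

theorem pvFold_step_not_mem (s : String) :
    ∀ (day : List (String × List (String × String))) (c : PySem.Dict String Int),
    s ∉ day.map Prod.fst → (day.foldl pvStep c).getD s 0 = c.getD s 0 := by
  intro day
  induction day with
  | nil => intro c _; rfl
  | cons p rest ih =>
    intro c h
    simp only [List.map_cons, List.mem_cons, not_or] at h
    simp only [List.foldl_cons]
    rw [ih _ h.2]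
    unfold pvStep
    split
    · rw [PySem.Dict.getD_modify, if_neg (fun he => h.1 he)]
    · rfl

theorem pvFold_step_day (s : String) :
    ∀ (day : List (String × List (String × String))) (c : PySem.Dict String Int),
    (day.map Prod.fst).Nodup →
    (day.foldl pvStep c).getD s 0 = c.getD s 0 + (if pvOkDay day s then 1 else 0) := by
  intro day
  induction day with
  | nil => intro c _; simp [pvOkDay, PySem.Dict.get?]
  | cons p rest ih =>
    intro c hnd
    simp only [List.map_cons, List.nodup_cons] at hnd
    simp only [List.foldl_cons]
    have hok : pvOkDay (p :: rest) s =
        (if p.1 == s then (PySem.Dict.mk p.2).contains "PRCP" else pvOkDay rest s) := by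
      unfold pvOkDay
      rw [PySem.Dict.get?_mk_cons]
      by_cases h : (p.1 == s) = true
      · rw [if_pos h, if_pos h]
      · rw [if_neg h, if_neg h]
    by_cases he : p.1 = s
    · subst he
      rw [pvFold_step_not_mem _ _ _ hnd.1]
      have hok2 : pvOkDay (p :: rest) p.1 = (PySem.Dict.mk p.2).contains "PRCP" := by
        rw [hok]; simp
      rw [hok2]
      unfold pvStep
      by_cases hc : (PySem.Dict.mk p.2).contains "PRCP" = true
      · rw [if_pos hc, hc, PySem.Dict.getD_modify, if_pos rfl]
        simp
      · rw [Bool.not_eq_true] at hc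
        rw [hc]
        simp
    · rw [ih _ hnd.2]
      have hok2 : pvOkDay (p :: rest) s = pvOkDay rest s := by
        rw [hok, if_neg (by simpa using he)]
      rw [hok2]
      unfold pvStep
      by_cases hc : (PySem.Dict.mk p.2).contains "PRCP" = true
      · rw [if_pos hc, PySem.Dict.getD_modify, if_neg (fun h => he h.symm)]
      · rw [Bool.not_eq_true] at hc
        rw [hc]
        simp

-- Dict.mk day |>.items is day itself, so pvCountB is the nested fold by pvStep
theorem pvCount_getD (s : String) :
    ∀ (aas : List (List (String × List (String × String)))) (c : PySem.Dict String Int),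
    (∀ day ∈ aas, (day.map Prod.fst).Nodup) →
    (aas.foldl (fun counts day => (PySem.Dict.mk day).items.foldl pvStep counts) c).getD s 0
    = c.getD s 0 + ((aas.countP (fun day => pvOkDay day s) : Int)) := by
  intro aas
  induction aas with
  | nil => intro c _; simp
  | cons day rest ih =>
    intro c h
    simp only [List.foldl_cons]
    rw [ih _ (fun d hd => h d (List.mem_cons_of_mem _ hd))]
    rw [pvFold_step_day s day c (h day (List.mem_cons_self ..))]
    rw [List.countP_cons]
    by_cases hd : pvOkDay day s
    · simp [hd]; ring
    · simp [hd]

-- count equals the number of days iff every day passes the test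
theorem pvCount_eq_okA (aas : List (List (String × List (String × String)))) (s : String)
    (hnd : ∀ day ∈ aas, (day.map Prod.fst).Nodup) :
    ((pvCountB aas).getD s 0 == (aas.length : Int)) = pvOkA aas s := by
  unfold pvCountB
  rw [pvCount_getD s aas PySem.Dict.empty hnd]
  have hcp : aas.countP (fun day => pvOkDay day s) ≤ aas.length := List.countP_le_length ..
  have hok : pvOkA aas s = aas.all (fun day => pvOkDay day s) := rfl
  rw [hok]
  by_cases hall : aas.all (fun day => pvOkDay day s)
  · rw [hall]
    have : aas.countP (fun day => pvOkDay day s) = aas.length := by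
      rw [List.countP_eq_length]
      intro a ha
      exact (List.all_eq_true.mp hall) a ha
    simp [PySem.Dict.getD_empty, this]
  · rw [Bool.not_eq_true] at hall
    rw [hall]
    have : aas.countP (fun day => pvOkDay day s) ≠ aas.length := by
      intro hc
      have := List.countP_eq_length.mp hc
      rw [Bool.eq_false_iff] at hall
      exact hall (List.all_eq_true.mpr (fun a ha => this a ha))
    simp only [PySem.Dict.getD_empty, zero_add]
    rw [beq_eq_false_iff_ne]
    exact fun h => this (by exact_mod_cast h)

-- selection with pvOkA as the condition (proof-side mirror of pvSelectB)
def pvCollect (aas : List (List (String × List (String × String)))) :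
    List String → List String → List String
  | [], acc => acc
  | s :: rest, acc =>
    if pvOkA aas s then
      if (acc ++ [s]).length == pv_num_stations then acc ++ [s]
      else pvCollect aas rest (acc ++ [s])
    else pvCollect aas rest acc

theorem pvSelectB_eq_collect (aas : List (List (String × List (String × String))))
    (hnd : ∀ day ∈ aas, (day.map Prod.fst).Nodup) :
    ∀ (rest acc : List String),
    pvSelectB (pvCountB aas) (aas.length : Int) rest acc = pvCollect aas rest acc := by
  intro rest
  induction rest with
  | nil => intro acc; rfl
  | cons s rest ih =>
    intro acc
    unfold pvSelectB pvCollect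
    rw [pvCount_eq_okA aas s hnd]
    by_cases h : pvOkA aas s
    · rw [if_pos h, if_pos h]
      by_cases hfull : ((acc ++ [s]).length == pv_num_stations)
      · rw [if_pos hfull, if_pos hfull]
      · rw [if_neg hfull, if_neg hfull, ih]
    · rw [if_neg h, if_neg h, ih]

-- the per-day entry and the 'transposed' shape both programs maintain
def pvEntry (all_available_stations : List (List (String × List (String × String)))) (d : Nat) (s : String) : List (String × String) :=
  (PySem.Dict.mk (all_available_stations.getD d [])).getD s []

def pvMkBest (all_available_stations : List (List (String × List (String × String)))) (acc : List String) : List (List (List (String × String))) :=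
  (List.range (2 * pv_day_span + 1)).map (fun d => acc.map (pvEntry all_available_stations d))

-- folding the append-at-index step over indices < L.length ignores a trailing element
theorem pvFoldl_set_append {alpha : Type} (f : Nat → alpha) (l : List Nat) :
    ∀ (L : List (List alpha)) (x : List alpha), (∀ d ∈ l, d < L.length) →
    l.foldl (fun b d => b.set d ((b.getD d []) ++ [f d])) (L ++ [x]) =
    (l.foldl (fun b d => b.set d ((b.getD d []) ++ [f d])) L) ++ [x] := by
  induction l with
  | nil => intro L x _; rfl
  | cons d l ih =>
    intro L x h
    have hd : d < L.length := h d (List.mem_cons_self ..)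
    simp only [List.foldl_cons]
    rw [List.getD_append L [x] [] d hd, List.set_append, if_pos hd]
    exact ih _ x (fun e he => by rw [List.length_set]; exact h e (List.mem_cons_of_mem _ he))

-- the per-day append loop turns the transposed shape for acc into the one for acc ++ [s]
theorem pvFoldl_range_set {alpha : Type} (f : Nat → alpha) (g : Nat → List alpha) (n : Nat) :
    (List.range n).foldl (fun b d => b.set d ((b.getD d []) ++ [f d])) ((List.range n).map g)
    = (List.range n).map (fun d => g d ++ [f d]) := by
  induction n with
  | zero => rfl
  | succ n ih =>
    rw [List.range_succ, List.map_append, List.map_append, List.foldl_append]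
    simp only [List.map_cons, List.map_nil]
    rw [pvFoldl_set_append f (List.range n) ((List.range n).map g) (g n)
        (fun d hd => by simpa using List.mem_range.mp hd),
      ih]
    simp only [List.foldl_cons, List.foldl_nil]
    rw [List.getD_append_right _ _ _ _ (by simp), List.set_append]
    simp

theorem pvPush_mkBest (aas : List (List (String × List (String × String)))) (s : String) (acc : List String) :
    pvPushA aas s (pvMkBest aas acc) = pvMkBest aas (acc ++ [s]) := by
  unfold pvPushA pvMkBest
  have h := pvFoldl_range_set (fun d => pvEntry aas d s) (fun d => acc.map (pvEntry aas d))
    (2 * pv_day_span + 1)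
  have h2 : (List.range (2 * pv_day_span + 1)).map
        (fun d => acc.map (pvEntry aas d) ++ [pvEntry aas d s])
      = (List.range (2 * pv_day_span + 1)).map (fun d => (acc ++ [s]).map (pvEntry aas d)) := by
    simp
  exact h.trans h2

theorem pvMkBest_getD_zero (aas : List (List (String × List (String × String)))) (acc : List String) :
    (pvMkBest aas acc).getD 0 [] = acc.map (pvEntry aas 0) := by
  unfold pvMkBest
  rfl

theorem pvLoopA_eq (sorted_row : List String) (aas : List (List (String × List (String × String))))
    (rest : List String) : ∀ (i : Nat) (acc : List String), sorted_row.drop i = rest →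
    acc.length < pv_num_stations →
    pvLoopA sorted_row aas i (pvMkBest aas acc) = pvMkBest aas (pvCollect aas rest acc) := by
  induction rest with
  | nil =>
    intro i acc hdrop _
    have hlen : sorted_row.length ≤ i := by
      have := congrArg List.length hdrop
      simp at this; omega
    rw [pvLoopA]
    rw [dif_neg (by omega)]
    rfl
  | cons s rest ih =>
    intro i acc hdrop hacc
    have hi : i < sorted_row.length := by
      by_contra hge
      rw [List.drop_eq_nil_of_le (by omega)] at hdrop
      exact List.cons_ne_nil s rest hdrop.symm
    have hget : sorted_row.getD i "" = s := by
      have h0 : (sorted_row.drop i)[0]? = some s := by rw [hdrop]; rfl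
      rw [List.getElem?_drop] at h0
      simp only [List.getD_eq_getElem?_getD, Nat.add_zero] at *
      rw [h0]; rfl
    have hdrop' : sorted_row.drop (i + 1) = rest := by
      rw [← List.drop_drop, hdrop]; rfl
    rw [pvLoopA]
    rw [dif_pos ⟨hi, by rw [pvMkBest_getD_zero]; simpa using hacc⟩, hget]
    by_cases hb : pvOkA aas s = true
    · rw [if_pos hb, pvPush_mkBest]
      show _ = pvMkBest aas (pvCollect aas (s :: rest) acc)
      unfold pvCollect
      rw [if_pos hb]
      by_cases hfull : (acc ++ [s]).length = pv_num_stations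
      · rw [if_pos (by simpa using hfull)]
        rw [pvLoopA]
        rw [dif_neg (by
          rw [pvMkBest_getD_zero]
          simp only [List.length_map, List.length_append, List.length_cons, List.length_nil,
            pv_num_stations] at hfull ⊢
          omega)]
      · rw [if_neg (by simpa using hfull)]
        exact ih (i + 1) (acc ++ [s]) hdrop'
          (by simp only [List.length_append, List.length_cons, List.length_nil] at hfull hacc ⊢; omega)
    · rw [if_neg hb]
      show _ = pvMkBest aas (pvCollect aas (s :: rest) acc)
      unfold pvCollect
      rw [if_neg hb]
      exact ih (i + 1) acc hdrop' hacc

-- ===== VERDICT (by name: the statement is the Claim_ definition above) =====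
theorem get_best_available_stations_spec : Claim_equal_get_best_available_stations := by
  intro sorted_row aas _ hpre
  unfold Spec_get_best_available_stations
  unfold get_best_available_stations get_best_available_stations_alt
  have hrep : List.replicate (2 * pv_day_span + 1) ([] : List (List (String × String))) = pvMkBest aas [] := by
    unfold pvMkBest
    simp [List.map_const']
  rw [hrep, pvLoopA_eq sorted_row aas (sorted_row.drop 1) 1 [] rfl (by simp [pv_num_stations])]
  show _ = pvMkBest aas (pvSelectB (pvCountB aas) (aas.length : Int) (sorted_row.drop 1) [])
  rw [pvSelectB_eq_collect aas hpre.1]
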